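-- pv_equiv track=rewrite | github.com/SrBlackRM/Python | Ferramentas/crypto.py | descriptografa
-- ===== SOURCE A (Python) =====
-- def analisa(numero):
--     minimo = 65
--     maximo = 123
--     if numero == 32:
--         numero = 123
--     while numero < minimo:
--         numero = maximo - (minimo - numero)
--     while numero > maximo:
--         numero = minimo + (numero - maximo)
--     else:
--         pass
--     return(numero)
--
-- def descriptografa(senha_int, key_int):
--     cripto = []
--     key = 0
--     for i in range(0,len(key_int)):
--         key += key_int[i]
--     for i in range(len(senha_int)):
--         letra = analisa(senha_int[i] - key)
--         if letra == 123:
--             letra = 32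
--         cripto.append(letra)
--     return cripto
-- ===== SOURCE B (Python) =====
-- def descriptografa(senha_int, key_int):
--     key = sum(key_int)
--     out = []
--     for s in senha_int:
--         n = s - key
--         if n == 32:
--             letra = 123
--         elif 65 <= n <= 123:
--             letra = n
--         elif n < 65:
--             letra = 65 + (n - 65) % 58
--         else:
--             letra = 66 + (n - 66) % 58
--         out.append(32 if letra == 123 else letra)
--     return out
-- ===== Notes on version B (the rewrite author's own statement) =====
-- stated objective: faster
-- what changed: Replaces analisa's iterative 58-step wrap-around loops by direct modular arithmetic ((n-65)%58 / (n-66)%58) and the index-based key loop by sum(), keeping the 32/123 special cases.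
import Mathlib
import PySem

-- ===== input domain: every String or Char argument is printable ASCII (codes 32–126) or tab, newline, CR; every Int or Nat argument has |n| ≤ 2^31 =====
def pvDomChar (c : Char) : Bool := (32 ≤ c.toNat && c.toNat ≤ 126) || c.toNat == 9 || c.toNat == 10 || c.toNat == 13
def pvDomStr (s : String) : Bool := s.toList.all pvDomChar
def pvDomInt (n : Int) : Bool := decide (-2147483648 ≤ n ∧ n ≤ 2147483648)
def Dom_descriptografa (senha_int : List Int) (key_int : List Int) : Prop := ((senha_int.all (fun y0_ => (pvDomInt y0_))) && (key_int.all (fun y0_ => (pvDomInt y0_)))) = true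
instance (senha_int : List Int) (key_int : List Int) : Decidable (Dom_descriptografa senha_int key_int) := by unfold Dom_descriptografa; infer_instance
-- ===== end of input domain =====

-- B replaces A's per-character 58-step wrap-around loops by direct modular arithmetic (objective: faster).

-- ===== PORT A =====
-- 'while numero < minimo: numero = maximo - (minimo - numero)'
def analisaUp (numero : Int) : Int :=
  if numero < 65 then analisaUp (123 - (65 - numero)) else numero
termination_by (65 - numero).toNat
decreasing_by omega

-- 'while numero > maximo: numero = minimo + (numero - maximo)'
def analisaDown (numero : Int) : Int :=
  if numero > 123 then analisaDown (65 + (numero - 123)) else numero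
termination_by (numero - 123).toNat
decreasing_by omega

def analisa (numero : Int) : Int :=
  let numero := if numero = 32 then 123 else numero
  analisaDown (analisaUp numero)

def descriptografa (senha_int : List Int) (key_int : List Int) : List Int :=
  let key := (PySem.List.pyRange 0 (PySem.List.len key_int) 1).foldl
      (fun key i => key + PySem.List.pyGetD key_int i 0) 0
  (PySem.List.pyRange 0 (PySem.List.len senha_int) 1).foldl
      (fun cripto i =>
        let letra := analisa (PySem.List.pyGetD senha_int i 0 - key)
        let letra := if letra = 123 then 32 else letra
        cripto ++ [letra]) []

-- ===== PORT B =====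
def descriptografa_alt (senha_int : List Int) (key_int : List Int) : List Int :=
  let key := key_int.sum
  senha_int.map (fun s =>
    let n := s - key
    let letra : Int :=
      if n = 32 then 123
      else if 65 ≤ n ∧ n ≤ 123 then n
      else if n < 65 then 65 + PySem.Int.mod (n - 65) 58
      else 66 + PySem.Int.mod (n - 66) 58
    if letra = 123 then 32 else letra)

-- ===== PRECONDITION & SPEC =====
def Spec_descriptografa (senha_int : List Int) (key_int : List Int) (out : List Int) : Prop := out = descriptografa_alt senha_int key_int
instance (senha_int : List Int) (key_int : List Int) (out : List Int) : Decidable (Spec_descriptografa senha_int key_int out) := by unfold Spec_descriptografa; infer_instance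

-- ===== CLAIM (what is proved, stated in full; the proofs are below) =====
def Claim_equal_descriptografa : Prop := ∀ (senha_int : List Int) (key_int : List Int), Dom_descriptografa senha_int key_int → Spec_descriptografa senha_int key_int (descriptografa senha_int key_int)

-- ===== LEMMAS AND PROOFS =====

lemma analisaUp_eq (n : Int) : analisaUp n = if n < 65 then 65 + (n - 65) % 58 else n := by
  fun_induction analisaUp n with
  | case1 n h ih => rw [ih]; split_ifs <;> omega
  | case2 n h => simp [h]

lemma analisaDown_eq (n : Int) : analisaDown n = if n > 123 then 66 + (n - 66) % 58 else n := by
  fun_induction analisaDown n with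
  | case1 n h ih => rw [ih]; split_ifs <;> omega
  | case2 n h => simp [h]

lemma analisa_step (n : Int) :
    (let letra := analisa n; if letra = 123 then (32 : Int) else letra) =
    (let letra : Int :=
        if n = 32 then 123
        else if 65 ≤ n ∧ n ≤ 123 then n
        else if n < 65 then 65 + PySem.Int.mod (n - 65) 58
        else 66 + PySem.Int.mod (n - 66) 58
      if letra = 123 then 32 else letra) := by
  simp only [analisa, analisaUp_eq, analisaDown_eq,
    PySem.Int.mod_eq_emod_of_pos (show (0:Int) < 58 by norm_num)]
  have h65 := Int.emod_nonneg (n - 65) (by norm_num : (58:Int) ≠ 0)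
  have h65' := Int.emod_lt_of_pos (n - 65) (by norm_num : (0:Int) < 58)
  have h66 := Int.emod_nonneg (n - 66) (by norm_num : (58:Int) ≠ 0)
  have h66' := Int.emod_lt_of_pos (n - 66) (by norm_num : (0:Int) < 58)
  split_ifs <;> omega

-- ===== VERDICT (by name: the statement is the Claim_ definition above) =====
theorem descriptografa_spec : Claim_equal_descriptografa := by
  intro senha_int key_int _
  unfold Spec_descriptografa descriptografa descriptografa_alt
  rw [PySem.List.foldl_pyRange_zero_pyGetD key_int 0 (fun key x => key + x) 0,
      PySem.List.foldl_pyRange_zero_pyGetD senha_int 0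
        (fun cripto s =>
          cripto ++ [if analisa (s - key_int.foldl (fun key x => key + x) 0) = 123 then (32:Int)
                     else analisa (s - key_int.foldl (fun key x => key + x) 0)]) [],
      PySem.List.foldl_append_singleton_eq_map]
  have hkey : key_int.foldl (fun key x => key + x) 0 = key_int.sum := by
    rw [List.sum_eq_foldl]
  rw [hkey]
  simp only [List.nil_append]
  exact List.map_congr_left (fun s _ => analisa_step (s - key_int.sum))
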